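-- pv_equiv track=rewrite | github.com/rasooll/Python-Learning | Taklif2/part3.py | spelling_corrector
-- ===== SOURCE A (Python) =====
-- def spelling_corrector(s,correct_spelled):
-- 	def single_insert_or_delete(s1,s2):
-- 	    s1=s1.lower()
-- 	    s2=s2.lower()
-- 	    if s1==s2:
-- 	        return 0
-- 	    if abs(len(s1)-len(s2))!=1:
-- 	        return 2
--
-- 	    if len(s1)>len(s2):
-- 	        # only deletion is possible
-- 	        for k in range(len(s2)):
-- 	            if s1[k]!=s2[k]:
-- 	                if s1[k+1:]==s2[k:]:
-- 	                    return 1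
-- 	                else:
-- 	                    return 2
-- 	        return 1
-- 	    else: # s1 is shorter Only insertion is possible
-- 	        for k in range(len(s1)):
-- 	            if s1[k]!=s2[k]:
-- 	                if s1[k:]==s2[k+1:]:
-- 	                    return 1
-- 	                else:
-- 	                    return 2
-- 	        return 1
--
-- 	def find_mismatch(s1,s2):
-- 	    if len(s1) != len(s2):
-- 	        return 2
-- 	    s1=s1.lower()
-- 	    s2=s2.lower()
-- 	    number_of_mismatches=0
-- 	    for index in range(len(s1)):
-- 	        if s1[index] != s2[index]:
-- 	            number_of_mismatches=number_of_mismatches+1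
-- 	            if number_of_mismatches>1:
-- 	                return 2
-- 	    return number_of_mismatches
--
-- 	words=s.strip().split()
-- 	output_str=""
-- 	for current_word in words:
-- 		if len(current_word)<=2 or (current_word in correct_spelled) :
-- 			output_str=output_str+" "+current_word
-- 			continue
-- 		min_mismatch=2
-- 		replacement_word=current_word
-- 		for correct_word in correct_spelled:
-- 			if min(find_mismatch(current_word,correct_word), single_insert_or_delete(current_word,correct_word))==1:
-- 				replacement_word=correct_word
-- 				break
-- 		output_str=output_str+" "+replacement_word
-- 	return output_str.strip().lower()
-- ===== SOURCE B (Python) =====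
-- def spelling_corrector(s, correct_spelled):
--     # SymSpell-style: precompute a delete-1 variant index of the dictionary once,
--     # then each word looks up only its own variants instead of scanning the whole dictionary.
--     def deletes(w):
--         return [w[:i] + w[i + 1:] for i in range(len(w))]
--
--     def dist1(a, b):
--         # exactly one case-insensitive substitution, insertion or deletion (a, b already lowercased)
--         if a == b:
--             return False
--         if len(a) == len(b):
--             for i in range(len(a)):
--                 if a[i] != b[i]:
--                     return a[i + 1:] == b[i + 1:]
--             return False
--         if len(a) == len(b) + 1:
--             a, b = b, a
--         elif len(b) != len(a) + 1:
--             return False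
--         # now len(b) == len(a) + 1: is b just a with one char inserted?
--         for i in range(len(a)):
--             if a[i] != b[i]:
--                 return a[i:] == b[i + 1:]
--         return True
--
--     index = {}
--     for i, d in enumerate(correct_spelled):
--         dl = d.lower()
--         for v in [dl] + deletes(dl):
--             index.setdefault(v, []).append((i, d))
--     exact = set(correct_spelled)
--     lens = {len(d.lower()) for d in correct_spelled}
--
--     output_str = ""
--     for w in s.strip().split():
--         if len(w) <= 2 or w in exact:
--             output_str = output_str + " " + w
--             continue
--         wl = w.lower()
--         keys = [wl]
--         if len(wl) in lens or len(wl) - 1 in lens: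
--             # a delete-1 variant of wl can only hit entries of length len(wl)-1 or len(wl)
--             keys = keys + deletes(wl)
--         cand = set()
--         for k in keys:
--             for p in index.get(k, []):
--                 cand.add(p)
--         replacement = w
--         for _, d in sorted(cand, key=lambda p: p[0]):
--             if dist1(wl, d.lower()):
--                 replacement = d
--                 break
--         output_str = output_str + " " + replacement
--     return output_str.strip().lower()
-- ===== Notes on version B (the rewrite author's own statement) =====
-- stated objective: faster
-- what changed: Replaces the per-word scan of the whole dictionary with a SymSpell-style delete-1 variant index built once over the dictionary (with length pruning of the query's variants), so each word inspects only dictionary entries sharing a variant key, verified by a single merged distance-1 test; exact membership uses a set.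
import Mathlib
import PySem

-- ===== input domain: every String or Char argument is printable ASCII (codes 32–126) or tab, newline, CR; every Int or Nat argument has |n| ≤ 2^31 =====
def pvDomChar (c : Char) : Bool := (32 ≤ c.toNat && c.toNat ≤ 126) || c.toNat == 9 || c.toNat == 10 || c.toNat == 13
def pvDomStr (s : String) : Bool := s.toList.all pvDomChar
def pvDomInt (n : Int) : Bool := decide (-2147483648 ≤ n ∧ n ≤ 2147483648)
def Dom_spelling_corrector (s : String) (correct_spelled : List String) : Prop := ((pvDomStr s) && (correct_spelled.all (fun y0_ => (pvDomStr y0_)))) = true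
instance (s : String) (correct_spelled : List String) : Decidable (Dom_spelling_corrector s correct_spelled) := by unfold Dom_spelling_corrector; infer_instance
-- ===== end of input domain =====

-- B replaces A's per-word scan of the whole dictionary by a delete-1 variant index
-- (SymSpell style) built once over the dictionary; same return value, B is faster.

-- ===== PORT A =====
-- Character loops indexed by `range(len(...))` are transliterated as structural
-- recursion over the same characters in the same order (the loops walk both
-- strings position by position, so the paired recursion is the same traversal).

-- inner loop of find_mismatch: count mismatching positions, early `return 2`
def pvFmLoop : List Char → List Char → Int → Int
  | [], _, cnt => cnt
  | _ :: _, [], cnt => cnt          -- unreachable: only called with equal lengths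
  | x :: xs, y :: ys, cnt =>
    if x ≠ y then
      (if cnt + 1 > 1 then 2 else pvFmLoop xs ys (cnt + 1))
    else pvFmLoop xs ys cnt

def pvFindMismatch (s1 s2 : String) : Int :=
  if PySem.Str.len s1 ≠ PySem.Str.len s2 then 2
  else pvFmLoop (PySem.Str.lower s1).toList (PySem.Str.lower s2).toList 0

-- deletion loop of single_insert_or_delete (s1 longer): at the first mismatch
-- at position k it compares s1[k+1:] with s2[k:]; the loop runs over range(len(s2))
def pvSidDel : List Char → List Char → Int
  | _, [] => 1                      -- loop over range(len(s2)) finished: return 1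
  | [], _ :: _ => 1                 -- unreachable: len(s1) = len(s2) + 1
  | x :: xs, y :: ys =>
    if x ≠ y then (if xs = y :: ys then 1 else 2) else pvSidDel xs ys

-- insertion loop (s1 shorter): compares s1[k:] with s2[k+1:], loop over range(len(s1))
def pvSidIns : List Char → List Char → Int
  | [], _ => 1
  | _ :: _, [] => 1                 -- unreachable: len(s2) = len(s1) + 1
  | x :: xs, y :: ys =>
    if x ≠ y then (if x :: xs = ys then 1 else 2) else pvSidIns xs ys

def pvSid (s1 s2 : String) : Int :=
  let a := (PySem.Str.lower s1).toList
  let b := (PySem.Str.lower s2).toList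
  if a = b then 0
  else if ((a.length : Int) - (b.length : Int)).natAbs ≠ 1 then 2
  else if b.length < a.length then pvSidDel a b
  else pvSidIns a b

-- the inner `for correct_word in correct_spelled: … break` (the dead local
-- min_mismatch is assigned 2 and never read; it is dropped)
def pvAScan (current : String) : List String → String
  | [] => current
  | d :: rest =>
    if min (pvFindMismatch current d) (pvSid current d) = 1 then d
    else pvAScan current rest

def spelling_corrector (s : String) (correct_spelled : List String) : String :=
  let words := PySem.Str.split₀ (PySem.Str.strip s)
  let output := words.foldl (fun acc w =>
    if PySem.Str.len w ≤ 2 ∨ correct_spelled.contains w then acc ++ " " ++ w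
    else acc ++ " " ++ pvAScan w correct_spelled) ""
  PySem.Str.lower (PySem.Str.strip output)

-- ===== PORT B =====
-- Source B's deletes(w) = [w[:i]+w[i+1:] for i in range(len(w))]: the same list of
-- delete-one-character variants in the same order (i = 0 first), built structurally
def pvDeletes : List Char → List (List Char)
  | [] => []
  | x :: xs => xs :: (pvDeletes xs).map (x :: ·)

-- Source B's dist1, same-length branch: first mismatch, then compare a[i+1:], b[i+1:]
def pvSub1 : List Char → List Char → Bool
  | [], _ => false
  | _ :: _, [] => false
  | x :: xs, y :: ys => if x ≠ y then decide (xs = ys) else pvSub1 xs ys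

-- Source B's dist1, insertion branch (len b = len a + 1): first mismatch, a[i:] vs b[i+1:]
def pvIns1 : List Char → List Char → Bool
  | [], _ => true
  | _ :: _, [] => true              -- unreachable: len b = len a + 1
  | x :: xs, y :: ys => if x ≠ y then decide (x :: xs = ys) else pvIns1 xs ys

-- Source B's dist1 (arguments already lowercased); the python `a, b = b, a` swap is
-- transliterated as the two symmetric branches
def pvDist1 (a b : List Char) : Bool :=
  if a = b then false
  else if a.length = b.length then pvSub1 a b
  else if a.length = b.length + 1 then pvIns1 b a
  else if b.length = a.length + 1 then pvIns1 a b
  else false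

-- lens = {len(d.lower()) for d in correct_spelled}
def pvLens (ds : List String) : PySem.Set Int :=
  PySem.Set.ofList (ds.map (fun d => ((PySem.Str.lower d).toList.length : Int)))

-- [dl] + deletes(dl)
def pvVariants (dl : List Char) : List (List Char) := dl :: pvDeletes dl

-- index = {}; for i, d in enumerate(correct_spelled): for v in variants: index.setdefault(v, []).append((i, d))
def pvIndex (correct_spelled : List String) : PySem.Dict (List Char) (List (Int × String)) :=
  (PySem.List.enumerate correct_spelled 0).foldl
    (fun idx p =>
      (pvVariants (PySem.Str.lower p.2).toList).foldl
        (fun idx v => idx.modify v [] (· ++ [p])) idx)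
    PySem.Dict.empty

-- keys = [wl], plus deletes(wl) when the dictionary holds a length they could hit
def pvKeys (lens : PySem.Set Int) (wl : List Char) : List (List Char) :=
  if lens.contains (wl.length : Int) || lens.contains ((wl.length : Int) - 1) then
    wl :: pvDeletes wl
  else [wl]

-- cand = set(); for k in keys: for p in index.get(k, []): cand.add(p)
def pvCand (idx : PySem.Dict (List Char) (List (Int × String))) (lens : PySem.Set Int)
    (wl : List Char) : PySem.Set (Int × String) :=
  (pvKeys lens wl).foldl (fun c k => PySem.Set.update c (idx.getD k [])) PySem.Set.empty

-- for _, d in sorted(cand, key=...): if dist1(wl, d.lower()): replacement = d; break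
def pvBScan (wl : List Char) : List (Int × String) → String → String
  | [], w => w
  | p :: rest, w =>
    if pvDist1 wl (PySem.Str.lower p.2).toList then p.2 else pvBScan wl rest w

def spelling_corrector_alt (s : String) (correct_spelled : List String) : String :=
  let idx := pvIndex correct_spelled
  let exact := PySem.Set.ofList correct_spelled
  let lens := pvLens correct_spelled
  let words := PySem.Str.split₀ (PySem.Str.strip s)
  let output := words.foldl (fun acc w =>
    if PySem.Str.len w ≤ 2 ∨ exact.contains w then acc ++ " " ++ w
    else
      acc ++ " " ++
        pvBScan ((PySem.Str.lower w).toList)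
          (PySem.List.sorted (pvCand idx lens ((PySem.Str.lower w).toList)) (fun p => p.1)) w) ""
  PySem.Str.lower (PySem.Str.strip output)

-- ===== PRECONDITION & SPEC =====
def Spec_spelling_corrector (s : String) (correct_spelled : List String) (out : String) : Prop := out = spelling_corrector_alt s correct_spelled
instance (s : String) (correct_spelled : List String) (out : String) : Decidable (Spec_spelling_corrector s correct_spelled out) := by unfold Spec_spelling_corrector; infer_instance

-- ===== CLAIM (what is proved, stated in full; the proofs are below) =====
def Claim_equal_spelling_corrector : Prop := ∀ (s : String) (correct_spelled : List String), Dom_spelling_corrector s correct_spelled → Spec_spelling_corrector s correct_spelled (spelling_corrector s correct_spelled)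

-- ===== LEMMAS AND PROOFS =====

-- A's two distance helpers, in closed form --------------------------------------

lemma pvFmLoop_one (a b : List Char) (h : a.length = b.length) :
    pvFmLoop a b 1 = if a = b then 1 else 2 := by
  induction a generalizing b with
  | nil =>
    cases b with
    | nil => simp [pvFmLoop]
    | cons y ys => simp at h
  | cons x xs ih =>
    cases b with
    | nil => simp at h
    | cons y ys =>
      by_cases hxy : x = y
      · have := ih ys (by simpa using h)
        simp [pvFmLoop, hxy, this]
      · simp [pvFmLoop, hxy]

lemma pvFmLoop_zero (a b : List Char) (h : a.length = b.length) :
    pvFmLoop a b 0 = if a = b then 0 else if pvSub1 a b then 1 else 2 := by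
  induction a generalizing b with
  | nil =>
    cases b with
    | nil => simp [pvFmLoop]
    | cons y ys => simp at h
  | cons x xs ih =>
    cases b with
    | nil => simp at h
    | cons y ys =>
      by_cases hxy : x = y
      · have := ih ys (by simpa using h)
        simp [pvFmLoop, pvSub1, hxy, this]
      · have := pvFmLoop_one xs ys (by simpa using h)
        simp only [pvFmLoop, pvSub1, if_pos hxy]
        norm_num [this, hxy]

lemma pvSidDel_eq (a b : List Char) : pvSidDel a b = if pvIns1 b a then 1 else 2 := by
  induction a generalizing b with
  | nil =>
    cases b with
    | nil => simp [pvSidDel, pvIns1]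
    | cons y ys => simp [pvSidDel, pvIns1]
  | cons x xs ih =>
    cases b with
    | nil => simp [pvSidDel, pvIns1]
    | cons y ys =>
      by_cases hxy : x = y
      · simp [pvSidDel, pvIns1, hxy, ih]
      · simp only [pvSidDel, pvIns1, if_pos hxy,
          if_pos (show y ≠ x from fun hyx => hxy hyx.symm)]
        by_cases hxs : xs = y :: ys
        · simp [hxs]
        · simp [hxs, Ne.symm hxs]

lemma pvSidIns_eq (a b : List Char) : pvSidIns a b = if pvIns1 a b then 1 else 2 := by
  induction a generalizing b with
  | nil => cases b <;> simp [pvSidIns, pvIns1]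
  | cons x xs ih =>
    cases b with
    | nil => simp [pvSidIns, pvIns1]
    | cons y ys =>
      by_cases hxy : x = y
      · simp [pvSidIns, pvIns1, hxy, ih]
      · simp only [pvSidIns, pvIns1, if_pos hxy]
        by_cases hxs : x :: xs = ys <;> simp [hxs]

-- A's per-pair test `min(find_mismatch, single_insert_or_delete) == 1` is B's dist1
lemma pvMin_eq_dist1 (w d : String) :
    (min (pvFindMismatch w d) (pvSid w d) = 1) ↔
      pvDist1 (PySem.Str.lower w).toList (PySem.Str.lower d).toList = true := by
  have hlw : (PySem.Str.lower w).toList.length = w.toList.length := by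
    rw [PySem.Str.toList_lower]; exact List.length_map ..
  have hld : (PySem.Str.lower d).toList.length = d.toList.length := by
    rw [PySem.Str.toList_lower]; exact List.length_map ..
  set a := (PySem.Str.lower w).toList with ha
  set b := (PySem.Str.lower d).toList with hb
  unfold pvFindMismatch pvSid pvDist1
  simp only [PySem.Str.len_eq, ← ha, ← hb]
  by_cases hab : a = b
  · have hlen : w.toList.length = d.toList.length := by
      rw [← hlw, ← hld, hab]
    rw [if_neg (by simpa using hlen), pvFmLoop_zero a b (by rw [hab]), if_pos hab]
    simp [hab]
  · by_cases hlen : a.length = b.length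
    · have hlen' : w.toList.length = d.toList.length := by rw [← hlw, ← hld, hlen]
      rw [if_neg (by simpa using hlen'), pvFmLoop_zero a b hlen, if_neg hab]
      have habs : ((a.length : Int) - (b.length : Int)).natAbs ≠ 1 := by omega
      simp only [hab, hlen, ite_false]
      cases hs : pvSub1 a b <;> simp_all
    · have hlen' : ¬ w.toList.length = d.toList.length := by rw [← hlw, ← hld]; exact fun h => hlen (by rw [h])
      rw [if_pos (by simpa using hlen')]
      simp only [if_neg hab, if_neg hlen]
      by_cases h1 : a.length = b.length + 1
      · have habs : ¬ ((a.length : Int) - (b.length : Int)).natAbs ≠ 1 := by omega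
        rw [if_neg habs, if_pos (by omega), pvSidDel_eq, if_pos h1]
        cases hi : pvIns1 b a <;> simp_all
      · by_cases h2 : b.length = a.length + 1
        · have habs : ¬ ((a.length : Int) - (b.length : Int)).natAbs ≠ 1 := by omega
          rw [if_neg habs, if_neg (by omega), pvSidIns_eq, if_neg h1, if_pos h2]
          cases hi : pvIns1 a b <;> simp_all
        · have habs : ((a.length : Int) - (b.length : Int)).natAbs ≠ 1 := by omega
          rw [if_pos habs, if_neg h1, if_neg h2]
          simp

-- completeness of the delete-1 variant keys -------------------------------------

lemma pvSub1_shared {a b : List Char} (h : pvSub1 a b = true) :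
    ∃ c, c ∈ pvDeletes a ∧ c ∈ pvDeletes b := by
  induction a generalizing b with
  | nil => simp [pvSub1] at h
  | cons x xs ih =>
    cases b with
    | nil => simp [pvSub1] at h
    | cons y ys =>
      by_cases hxy : x = y
      · simp only [pvSub1] at h
        rw [if_neg (not_not_intro hxy)] at h
        obtain ⟨c, hca, hcb⟩ := ih h
        refine ⟨x :: c, ?_, ?_⟩
        · exact List.mem_cons_of_mem _ (List.mem_map_of_mem hca)
        · rw [hxy]; exact List.mem_cons_of_mem _ (List.mem_map_of_mem hcb)
      · simp only [pvSub1, if_pos hxy, decide_eq_true_eq] at h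
        exact ⟨xs, List.mem_cons_self .., by rw [h]; exact List.mem_cons_self ..⟩

lemma pvIns1_mem {a b : List Char} (h : pvIns1 a b = true) (hl : b.length = a.length + 1) :
    a ∈ pvDeletes b := by
  induction a generalizing b with
  | nil =>
    match b, hl with
    | [c], _ => simp [pvDeletes]
  | cons x xs ih =>
    cases b with
    | nil => simp at hl
    | cons y ys =>
      by_cases hxy : x = y
      · simp only [pvIns1] at h
        rw [if_neg (not_not_intro hxy)] at h
        have := ih h (by simpa using hl)
        rw [hxy]
        exact List.mem_cons_of_mem _ (List.mem_map_of_mem this)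
      · simp only [pvIns1, if_pos hxy, decide_eq_true_eq] at h
        rw [h]
        exact List.mem_cons_self ..

lemma pvDist1_shared {a b : List Char} (h : pvDist1 a b = true) :
    ∃ v, v ∈ pvVariants a ∧ v ∈ pvVariants b := by
  unfold pvDist1 at h
  split_ifs at h with h1 h2 h3 h4
  · obtain ⟨c, hca, hcb⟩ := pvSub1_shared h
    exact ⟨c, List.mem_cons_of_mem _ hca, List.mem_cons_of_mem _ hcb⟩
  · exact ⟨b, List.mem_cons_of_mem _ (pvIns1_mem h h3), List.mem_cons_self ..⟩
  · exact ⟨a, List.mem_cons_self .., List.mem_cons_of_mem _ (pvIns1_mem h h4)⟩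

-- with the length pruning: a distance-1 dictionary word is still reachable by a key
lemma pvKeys_complete (ds : List String) (wl : List Char) (d : String) (hd : d ∈ ds)
    (h : pvDist1 wl (PySem.Str.lower d).toList = true) :
    ∃ v ∈ pvKeys (pvLens ds) wl, v ∈ pvVariants (PySem.Str.lower d).toList := by
  set dl := (PySem.Str.lower d).toList with hdl
  by_cases hg : ((pvLens ds).contains (wl.length : Int)
      || (pvLens ds).contains ((wl.length : Int) - 1)) = true
  · obtain ⟨v, hva, hvb⟩ := pvDist1_shared h
    exact ⟨v, by rw [pvKeys, if_pos hg]; exact hva, hvb⟩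
  · have hmem : ((dl.length : Int)) ∈ pvLens ds := by
      unfold pvLens
      exact (PySem.Set.mem_ofList ..).2 (List.mem_map.2 ⟨d, hd, by rw [hdl]⟩)
    have hg' := hg
    simp only [Bool.or_eq_true, PySem.Set.contains_iff, not_or] at hg'
    obtain ⟨h1, h2⟩ := hg'
    have hne1 : dl.length ≠ wl.length := fun he => h1 (by rw [← he]; exact_mod_cast hmem)
    have hne2 : (dl.length : Int) ≠ (wl.length : Int) - 1 := fun he => h2 (he ▸ hmem)
    unfold pvDist1 at h
    split_ifs at h with c1 c2 c3 c4
    · exact absurd c2.symm hne1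
    · exact absurd (by push_cast [c3]; ring) hne2
    · refine ⟨wl, ?_, List.mem_cons_of_mem _ (pvIns1_mem h c4)⟩
      rw [pvKeys, if_neg hg]
      exact List.mem_cons_self ..

-- the index and the candidate set ------------------------------------------------

lemma pvIndex_getD (ds : List String) (k : List Char) :
    (pvIndex ds).getD k [] =
      (((PySem.List.enumerate ds 0).flatMap
          (fun p => (pvVariants (PySem.Str.lower p.2).toList).map (fun v => (v, p)))).filter
        (fun q => q.1 == k)).map (·.2) := by
  unfold pvIndex
  rw [show (fun (idx : PySem.Dict (List Char) (List (Int × String))) (p : Int × String) =>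
        (pvVariants (PySem.Str.lower p.2).toList).foldl
          (fun idx v => idx.modify v [] (· ++ [p])) idx) =
      (fun idx p => ((pvVariants (PySem.Str.lower p.2).toList).map (fun v => (v, p))).foldl
          (fun d q => d.modify q.1 [] (· ++ [q.2])) idx) from
    funext fun idx => funext fun p =>
      (List.foldl_map (f := fun v => (v, p))
        (g := fun d q => PySem.Dict.modify d q.1 [] (· ++ [q.2]))
        (l := pvVariants (PySem.Str.lower p.2).toList) (init := idx)).symm]
  rw [← List.foldl_flatMap, PySem.Dict.getD_foldl_modify_append]
  simp [pysem]

lemma mem_pvIndex_getD (ds : List String) (k : List Char) (p : Int × String) :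
    p ∈ (pvIndex ds).getD k [] ↔
      p ∈ PySem.List.enumerate ds 0 ∧ k ∈ pvVariants (PySem.Str.lower p.2).toList := by
  rw [pvIndex_getD]
  simp only [List.mem_map, List.mem_filter, List.mem_flatMap, beq_iff_eq]
  constructor
  · rintro ⟨q, ⟨⟨p', hp', ⟨v, hv, rfl⟩⟩, hk⟩, rfl⟩
    simp only at hk ⊢
    subst hk
    exact ⟨hp', hv⟩
  · rintro ⟨hp, hk⟩
    exact ⟨(k, p), ⟨⟨p, hp, ⟨k, hk, rfl⟩⟩, rfl⟩, rfl⟩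

lemma mem_foldl_update {α κ : Type} [BEq α] [LawfulBEq α] (g : κ → List α) (ks : List κ)
    (c0 : PySem.Set α) (p : α) :
    p ∈ ks.foldl (fun c k => PySem.Set.update c (g k)) c0 ↔ p ∈ c0 ∨ ∃ k ∈ ks, p ∈ g k := by
  induction ks generalizing c0 with
  | nil => simp
  | cons k ks ih =>
    simp only [List.foldl_cons, ih, PySem.Set.mem_update, List.exists_mem_cons_iff]
    tauto

lemma nodup_foldl_update {α κ : Type} [BEq α] [LawfulBEq α] (g : κ → List α) (ks : List κ)
    (c0 : PySem.Set α) (h : c0.Nodup) :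
    (ks.foldl (fun c k => PySem.Set.update c (g k)) c0).Nodup := by
  induction ks generalizing c0 with
  | nil => exact h
  | cons k ks ih => exact ih _ (PySem.Set.nodup_update _ _ h)

lemma mem_pvCand (idx : PySem.Dict (List Char) (List (Int × String))) (lens : PySem.Set Int)
    (wl : List Char) (p : Int × String) :
    p ∈ pvCand idx lens wl ↔ ∃ k ∈ pvKeys lens wl, p ∈ idx.getD k [] := by
  unfold pvCand
  rw [mem_foldl_update]
  simp [PySem.Set.empty]

lemma mem_pvCand_index (ds : List String) (lens : PySem.Set Int) (wl : List Char)
    (p : Int × String) (hp : p ∈ pvCand (pvIndex ds) lens wl) :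
    ∃ (k : Nat) (h : k < ds.length), p = ((k : Int), ds[k]) := by
  obtain ⟨k, _, hmem⟩ := (mem_pvCand _ _ _ _).1 hp
  obtain ⟨henum, _⟩ := (mem_pvIndex_getD _ _ _).1 hmem
  obtain ⟨j, hj, hpj⟩ := (PySem.List.mem_enumerate_iff _ _ _).1 henum
  exact ⟨j, hj, by simpa using hpj⟩

-- first-match machinery ----------------------------------------------------------

lemma pvAScan_eq (w : String) (ds : List String) :
    pvAScan w ds =
      (ds.find? (fun d => decide (min (pvFindMismatch w d) (pvSid w d) = 1))).getD w := by
  induction ds with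
  | nil => simp [pvAScan]
  | cons d rest ih =>
    by_cases hc : min (pvFindMismatch w d) (pvSid w d) = 1
    · simp [pvAScan, hc]
    · simp [pvAScan, hc, ih]

lemma pvBScan_eq (wl : List Char) (L : List (Int × String)) (w : String) :
    pvBScan wl L w =
      (((L.find? (fun p => pvDist1 wl (PySem.Str.lower p.2).toList)).map (·.2)).getD w) := by
  induction L with
  | nil => simp [pvBScan]
  | cons p rest ih =>
    cases hc : pvDist1 wl (PySem.Str.lower p.2).toList
    · rw [List.find?_cons]
      simp only [pvBScan]
      rw [if_neg (by rw [hc]; exact Bool.false_ne_true), hc]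
      exact ih
    · rw [List.find?_cons]
      simp only [pvBScan]
      rw [if_pos hc, hc]
      rfl

lemma find?_enumerate_snd (ds : List String) (s : Int) (Q : String → Bool) :
    ((PySem.List.enumerate ds s).find? (fun p => Q p.2)).map (·.2) = ds.find? Q := by
  induction ds generalizing s with
  | nil => simp [PySem.List.enumerate_nil]
  | cons d rest ih =>
    rw [PySem.List.enumerate_cons]
    cases hc : Q d
    · simp [hc, ih]
    · simp [hc]

lemma find?_min_key {α : Type} (P : α → Bool) (key : α → Int) (L : List α)
    (hL : L.Pairwise (fun a b => key a < key b)) (q : α) (hq : L.find? P = some q) :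
    ∀ x ∈ L, P x = true → key q ≤ key x := by
  induction L with
  | nil => simp at hq
  | cons a t ih =>
    rw [List.find?_cons] at hq
    cases hPa : P a
    · rw [hPa] at hq
      intro x hx hPx
      rcases List.mem_cons.1 hx with rfl | hx'
      · exact absurd hPx (by simp [hPa])
      · exact ih hL.of_cons hq x hx' hPx
    · rw [hPa] at hq
      simp only [Option.some.injEq] at hq
      subst hq
      intro x hx hPx
      rcases List.mem_cons.1 hx with rfl | hx'
      · exact le_refl _
      · exact le_of_lt (List.rel_of_pairwise_cons hL hx')

lemma pairwise_key_inj {α : Type} (key : α → Int) (E : List α)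
    (hE : E.Pairwise (fun a b => key a < key b)) {p q : α}
    (hp : p ∈ E) (hq : q ∈ E) (hk : key p = key q) : p = q := by
  induction E with
  | nil => simp at hp
  | cons a t ih =>
    rcases List.mem_cons.1 hp with rfl | hp' <;> rcases List.mem_cons.1 hq with rfl | hq'
    · rfl
    · exact absurd hk (ne_of_lt (List.rel_of_pairwise_cons hE hq'))
    · exact absurd hk.symm (ne_of_lt (List.rel_of_pairwise_cons hE hp'))
    · exact ih hE.of_cons hp' hq' 

-- first match over a key-sorted sublist that contains every hit = first match overall
lemma find?_sub_eq {α : Type} (P : α → Bool) (key : α → Int) (E L : List α)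
    (hE : E.Pairwise (fun a b => key a < key b)) (hL : L.Pairwise (fun a b => key a < key b))
    (hsub : ∀ x ∈ L, x ∈ E) (hcomp : ∀ x ∈ E, P x = true → x ∈ L) :
    L.find? P = E.find? P := by
  cases hE' : E.find? P with
  | none =>
    have hnone := List.find?_eq_none.1 hE'
    exact List.find?_eq_none.2 fun x hx => hnone x (hsub x hx)
  | some p0 =>
    have hP0 : P p0 = true := List.find?_some hE'
    have hp0E : p0 ∈ E := List.mem_of_find?_eq_some hE'
    have hp0L : p0 ∈ L := hcomp _ hp0E hP0
    cases hL' : L.find? P with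
    | none => exact absurd hP0 (List.find?_eq_none.1 hL' _ hp0L)
    | some q =>
      have hPq : P q = true := List.find?_some hL'
      have hqL : q ∈ L := List.mem_of_find?_eq_some hL'
      have h1 := find?_min_key P key L hL q hL' p0 hp0L hP0
      have h2 := find?_min_key P key E hE p0 hE' q (hsub q hqL) hPq
      rw [pairwise_key_inj key E hE (hsub q hqL) hp0E (le_antisymm h1 h2)]

lemma pairwise_lt_sorted_pvCand (ds : List String) (lens : PySem.Set Int) (wl : List Char) :
    (PySem.List.sorted (pvCand (pvIndex ds) lens wl) (fun p => p.1)).Pairwise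
      (fun a b => a.1 < b.1) := by
  have hnd : (pvCand (pvIndex ds) lens wl).Nodup := nodup_foldl_update _ _ _ List.nodup_nil
  have hperm := PySem.List.sorted_perm (pvCand (pvIndex ds) lens wl) (fun p => p.1) false
  have hnds : (PySem.List.sorted (pvCand (pvIndex ds) lens wl) (fun p => p.1)).Nodup :=
    hperm.nodup_iff.2 hnd
  have hle := PySem.List.sorted_pairwise (pvCand (pvIndex ds) lens wl) (fun p => p.1)
  refine (hle.and hnds).imp_of_mem ?_
  intro a b ha hb hab
  rcases hab with ⟨hle', hne⟩
  rcases lt_or_eq_of_le hle' with h | h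
  · exact h
  · exfalso
    apply hne
    have ha' := (PySem.List.mem_sorted ..).1 ha
    have hb' := (PySem.List.mem_sorted ..).1 hb
    obtain ⟨i, hi, rfl⟩ := mem_pvCand_index ds lens wl a ha'
    obtain ⟨j, hj, rfl⟩ := mem_pvCand_index ds lens wl b hb'
    simp only at h
    have : i = j := by exact_mod_cast h
    subst this
    rfl

-- per-word equality of the two replacement computations
lemma pvWord_eq (ds : List String) (w : String) :
    pvAScan w ds =
      pvBScan ((PySem.Str.lower w).toList)
        (PySem.List.sorted (pvCand (pvIndex ds) (pvLens ds) ((PySem.Str.lower w).toList))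
          (fun p => p.1))
        w := by
  rw [pvAScan_eq, pvBScan_eq]
  have hpred : (fun d => decide (min (pvFindMismatch w d) (pvSid w d) = 1)) =
      (fun d => pvDist1 (PySem.Str.lower w).toList (PySem.Str.lower d).toList) := by
    funext d
    have h := pvMin_eq_dist1 w d
    cases hb : pvDist1 (PySem.Str.lower w).toList (PySem.Str.lower d).toList
    · simp only [hb] at h ⊢
      simp [h]
    · simp [h.2 hb]
  rw [hpred, ← find?_enumerate_snd ds 0]
  set wl := (PySem.Str.lower w).toList with hwl
  have hfind := find?_sub_eq (fun p => pvDist1 wl (PySem.Str.lower p.2).toList)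
      (fun p => p.1)
      (PySem.List.enumerate ds 0)
      (PySem.List.sorted (pvCand (pvIndex ds) (pvLens ds) wl) (fun p => p.1))
      (PySem.List.pairwise_lt_enumerate ds 0)
      (pairwise_lt_sorted_pvCand ds (pvLens ds) wl)
      (fun x hx => by
        obtain ⟨k, _, hmem⟩ := (mem_pvCand _ _ _ _).1 ((PySem.List.mem_sorted ..).1 hx)
        exact ((mem_pvIndex_getD _ _ _).1 hmem).1)
      (fun x hx hPx => by
        have hxd : x.2 ∈ ds := by
          obtain ⟨k, hk, rfl⟩ := (PySem.List.mem_enumerate_iff _ _ _).1 hx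
          exact List.getElem_mem hk
        obtain ⟨v, hva, hvb⟩ := pvKeys_complete ds wl x.2 hxd hPx
        exact (PySem.List.mem_sorted ..).2 ((mem_pvCand _ _ _ _).2
          ⟨v, hva, (mem_pvIndex_getD _ _ _).2 ⟨hx, hvb⟩⟩))
  rw [hfind]

-- ===== VERDICT (by name: the statement is the Claim_ definition above) =====
theorem spelling_corrector_spec : Claim_equal_spelling_corrector := by
  intro s ds _
  unfold Spec_spelling_corrector
  simp only [spelling_corrector, spelling_corrector_alt]
  refine congrArg PySem.Str.lower (congrArg PySem.Str.strip ?_)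
  apply List.foldl_ext
  intro acc w _
  by_cases hca : PySem.Str.len w ≤ 2 ∨ ds.contains w
  · rw [if_pos hca, if_pos (by
      rcases hca with h | h
      · exact Or.inl h
      · exact Or.inr ((PySem.Set.contains_iff ..).2
          ((PySem.Set.mem_ofList ..).2 (List.contains_iff_mem.1 h))))]
  · rw [if_neg hca, if_neg (fun h => hca (by
      rcases h with h | h
      · exact Or.inl h
      · exact Or.inr (List.contains_iff_mem.2
          ((PySem.Set.mem_ofList ..).1 ((PySem.Set.contains_iff ..).1 h)))))]
    rw [pvWord_eq ds w]
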